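-- pv_equiv track=rewrite | github.com/marcobaturan/Swissknife | swissknife.py | is_diagonal
-- ===== SOURCE A (Python) =====
-- def is_diagonal(lst):
--     for i in range(1, len(lst)):
--         temp = lst[:i+1]
--         for j, num in enumerate(temp[:-1]):
--             a = abs(num - temp[-1])
--             b = abs(j - i)
--             if a == b:
--                 return True
--     return False
-- ===== SOURCE B (Python) =====
-- def is_diagonal(lst):
--     diffs = set()
--     sums = set()
--     for i, v in enumerate(lst):
--         if v - i in diffs or v + i in sums:
--             return True
--         diffs.add(v - i)
--         sums.add(v + i)
--     return False
-- ===== Notes on version B (the rewrite author's own statement) =====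
-- stated objective: faster
-- what changed: Replaced the quadratic all-pairs scan with a single pass keeping two hash sets of value-index and value+index; a diagonal pair exists iff a new element collides with one of the sets.
import Mathlib
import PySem

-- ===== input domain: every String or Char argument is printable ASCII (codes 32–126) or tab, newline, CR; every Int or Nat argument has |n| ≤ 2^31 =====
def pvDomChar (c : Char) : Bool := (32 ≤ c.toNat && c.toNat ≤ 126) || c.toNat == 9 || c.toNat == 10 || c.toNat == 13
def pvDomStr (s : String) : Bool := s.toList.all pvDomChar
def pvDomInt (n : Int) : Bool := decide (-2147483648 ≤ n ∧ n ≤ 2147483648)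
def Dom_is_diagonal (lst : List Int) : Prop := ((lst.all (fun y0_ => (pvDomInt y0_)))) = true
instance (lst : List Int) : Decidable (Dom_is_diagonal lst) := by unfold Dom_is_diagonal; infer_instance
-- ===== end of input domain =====

-- B replaces A's quadratic all-pairs scan by one pass with two sets (value-index, value+index); proved to return the same Bool.

-- ===== PORT A =====
-- literal port of A: for i in range(1, len(lst)): temp = lst[:i+1]; for j, num in enumerate(temp[:-1]):
--   a = abs(num - temp[-1]); b = abs(j - i); if a == b: return True
-- temp[-1] is ported as pyGetD temp (-1) 0: temp = lst[:i+1] with i ≥ 1 is never empty, so the default is never used.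
def is_diagonal (lst : List Int) : Bool :=
  (PySem.List.pyRange 1 (lst.length : Int) 1).any (fun i =>
    let temp := PySem.List.slice lst none (some (i + 1))
    (PySem.List.enumerate (PySem.List.slice temp none (some (-1))) 0).any (fun p =>
      (p.2 - PySem.List.pyGetD temp (-1) 0).natAbs == (p.1 - i).natAbs))

-- ===== PORT B =====
-- one pass over enumerate(lst) carrying the two sets; Python's early 'return True' ≡ stopping the recursion with true
def altGo : List Int → Int → PySem.Set Int → PySem.Set Int → Bool
  | [], _, _, _ => false
  | v :: rest, i, diffs, sums =>
    if PySem.Set.contains diffs (v - i) || PySem.Set.contains sums (v + i) then true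
    else altGo rest (i + 1) (PySem.Set.add diffs (v - i)) (PySem.Set.add sums (v + i))

def is_diagonal_alt (lst : List Int) : Bool :=
  altGo lst 0 PySem.Set.empty PySem.Set.empty

-- ===== PRECONDITION & SPEC =====
def Spec_is_diagonal (lst : List Int) (out : Bool) : Prop := out = is_diagonal_alt lst
instance (lst : List Int) (out : Bool) : Decidable (Spec_is_diagonal lst out) := by unfold Spec_is_diagonal; infer_instance

-- ===== CLAIM (what is proved, stated in full; the proofs are below) =====
def Claim_equal_is_diagonal : Prop := ∀ (lst : List Int), Dom_is_diagonal lst → Spec_is_diagonal lst (is_diagonal lst)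

-- ===== LEMMAS AND PROOFS =====

-- the common mathematical content: some pair j < i lies on a diagonal
def Diag (lst : List Int) : Prop :=
  ∃ i j : ℕ, j < i ∧ i < lst.length ∧ (lst.getD j 0 - lst.getD i 0).natAbs = i - j

-- A's nested loops decide Diag
theorem isDiagonal_iff (lst : List Int) : is_diagonal lst = true ↔ Diag lst := by
  unfold is_diagonal Diag
  rw [List.any_eq_true]
  constructor
  · rintro ⟨i, hi, hinner⟩
    rw [PySem.List.mem_pyRange_one] at hi
    set m := i.toNat with hm
    have him : i = (m : Int) := by omega
    have h1m : 1 ≤ m := by omega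
    have hmlen : m < lst.length := by omega
    have htemp : PySem.List.slice lst none (some (i + 1)) = lst.take (m + 1) := by
      rw [PySem.List.slice_to _ (by omega)]; congr 1; omega
    have hys : PySem.List.slice (PySem.List.slice lst none (some (i + 1))) none (some (-1))
        = lst.take m := by
      rw [htemp, PySem.List.slice_to_neg_one, List.dropLast_eq_take, List.take_take,
        List.length_take]
      congr 1; omega
    have hlast : PySem.List.pyGetD (PySem.List.slice lst none (some (i + 1))) (-1) 0 = lst[m] := by
      rw [htemp]
      have hlen : (lst.take (m + 1)).length = m + 1 := by
        simp [List.length_take]; omega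
      rw [show ((-1 : Int)) = -((1 : ℕ) : Int) by norm_num,
        PySem.List.pyGetD_neg_natCast _ 1 0 (by omega) (by omega)]
      simp [hlen, List.getElem_take]
    simp only [List.any_eq_true, PySem.List.mem_enumerate_iff] at hinner
    obtain ⟨p, ⟨k, hk, hpk⟩, hcond⟩ := hinner
    subst hpk
    have hk2 : k < (lst.take m).length := hys ▸ hk
    have hklt : k < m := by
      simp only [List.length_take] at hk2; omega
    simp only [hys, hlast, List.getElem_take, beq_iff_eq] at hcond
    refine ⟨m, k, hklt, hmlen, ?_⟩
    rw [List.getD_eq_getElem _ _ (by omega : k < lst.length),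
      List.getD_eq_getElem _ _ hmlen]
    omega
  · rintro ⟨i, j, hji, hil, habs⟩
    rw [List.getD_eq_getElem _ _ (by omega : j < lst.length),
      List.getD_eq_getElem _ _ hil] at habs
    refine ⟨(i : Int), ?_, ?_⟩
    · exact PySem.List.mem_pyRange_one.mpr ⟨by omega, by omega⟩
    have htemp : PySem.List.slice lst none (some ((i : Int) + 1)) = lst.take (i + 1) := by
      rw [PySem.List.slice_to _ (by omega)]; congr 1
    have hys : PySem.List.slice (PySem.List.slice lst none (some ((i : Int) + 1))) none (some (-1))
        = lst.take i := by
      rw [htemp, PySem.List.slice_to_neg_one, List.dropLast_eq_take, List.take_take,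
        List.length_take]
      congr 1; omega
    have hlast : PySem.List.pyGetD (PySem.List.slice lst none (some ((i : Int) + 1))) (-1) 0
        = lst[i] := by
      rw [htemp]
      have hlen : (lst.take (i + 1)).length = i + 1 := by
        simp [List.length_take]; omega
      rw [show ((-1 : Int)) = -((1 : ℕ) : Int) by norm_num,
        PySem.List.pyGetD_neg_natCast _ 1 0 (by omega) (by omega)]
      simp [hlen, List.getElem_take]
    have hjys : j < (PySem.List.slice (PySem.List.slice lst none (some ((i : Int) + 1)))
        none (some (-1))).length := by
      rw [hys]; simp [List.length_take]; omega
    simp only [List.any_eq_true, PySem.List.mem_enumerate_iff]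
    refine ⟨((0 : Int) + (j : Int),
      (PySem.List.slice (PySem.List.slice lst none (some ((i : Int) + 1))) none (some (-1)))[j]'hjys),
      ⟨j, hjys, rfl⟩, ?_⟩
    simp only [hys, hlast, List.getElem_take, beq_iff_eq]
    omega

-- loop invariant for B's single pass
theorem altGo_iff (rest : List Int) : ∀ (lst : List Int) (m : ℕ)
    (diffs sums : PySem.Set Int),
    lst.drop m = rest →
    (∀ x, x ∈ diffs ↔ ∃ j : ℕ, j < m ∧ lst.getD j 0 - (j : Int) = x) →
    (∀ x, x ∈ sums ↔ ∃ j : ℕ, j < m ∧ lst.getD j 0 + (j : Int) = x) →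
    (altGo rest (m : Int) diffs sums = true ↔
      ∃ i j : ℕ, j < i ∧ m ≤ i ∧ i < lst.length ∧
        (lst.getD j 0 - lst.getD i 0).natAbs = i - j) := by
  induction rest with
  | nil =>
    intro lst m diffs sums hdrop _ _
    have hlen : lst.length ≤ m := by
      by_contra h
      have := List.drop_eq_nil_iff.mp hdrop
      omega
    simp only [altGo]
    constructor
    · intro h; cases h
    · rintro ⟨i, j, _, _, hi, _⟩; omega
  | cons v rest ih =>
    intro lst m diffs sums hdrop hd hs
    have hmlt : m < lst.length := by
      by_contra h
      rw [List.drop_eq_nil_iff.mpr (by omega)] at hdrop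
      cases hdrop
    have h1 : lst[m]? = some v := by
      rw [← List.head?_drop, hdrop]; rfl
    have hv : lst.getD m 0 = v := by
      rw [List.getD_eq_getElem?_getD, h1]; rfl
    simp only [altGo]
    split_ifs with hc
    · simp only [true_iff]
      rw [Bool.or_eq_true, PySem.Set.contains_iff, PySem.Set.contains_iff, hd, hs] at hc
      rcases hc with ⟨j, hj, hx⟩ | ⟨j, hj, hx⟩
      · exact ⟨m, j, hj, le_refl m, hmlt, by rw [hv]; omega⟩
      · exact ⟨m, j, hj, le_refl m, hmlt, by rw [hv]; omega⟩
    · have hdrop' : lst.drop (m + 1) = rest := by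
        rw [← List.drop_drop (i := 1) (j := m), hdrop, List.drop_one]
        rfl
      have hd' : ∀ x, x ∈ PySem.Set.add diffs (v - (m : Int)) ↔
          ∃ j : ℕ, j < m + 1 ∧ lst.getD j 0 - (j : Int) = x := by
        intro x
        rw [PySem.Set.mem_add, hd]
        constructor
        · rintro (⟨j, hj, hx⟩ | rfl)
          · exact ⟨j, by omega, hx⟩
          · exact ⟨m, by omega, by rw [hv]⟩
        · rintro ⟨j, hj, hx⟩
          rcases Nat.lt_or_ge j m with h | h
          · exact Or.inl ⟨j, h, hx⟩
          · have : j = m := by omega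
            subst this; right; rw [← hx, hv]
      have hs' : ∀ x, x ∈ PySem.Set.add sums (v + (m : Int)) ↔
          ∃ j : ℕ, j < m + 1 ∧ lst.getD j 0 + (j : Int) = x := by
        intro x
        rw [PySem.Set.mem_add, hs]
        constructor
        · rintro (⟨j, hj, hx⟩ | rfl)
          · exact ⟨j, by omega, hx⟩
          · exact ⟨m, by omega, by rw [hv]⟩
        · rintro ⟨j, hj, hx⟩
          rcases Nat.lt_or_ge j m with h | h
          · exact Or.inl ⟨j, h, hx⟩
          · have : j = m := by omega
            subst this; right; rw [← hx, hv]
      have hrec := ih lst (m + 1) _ _ hdrop' hd' hs'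
      push_cast at hrec
      rw [hrec]
      constructor
      · rintro ⟨i, j, hji, hmi, hil, habs⟩
        exact ⟨i, j, hji, by omega, hil, habs⟩
      · rintro ⟨i, j, hji, hmi, hil, habs⟩
        rcases Nat.lt_or_ge i (m + 1) with h | h
        · have him : i = m := by omega
          exfalso
          apply hc
          rw [Bool.or_eq_true, PySem.Set.contains_iff, PySem.Set.contains_iff, hd, hs]
          rw [him, hv] at habs
          rw [him] at hji
          have hcase : lst.getD j 0 - v = ((m : Int) - j) ∨
              lst.getD j 0 - v = -((m : Int) - j) := by omega
          rcases hcase with he | he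
          · right; exact ⟨j, hji, by omega⟩
          · left; exact ⟨j, hji, by omega⟩
        · exact ⟨i, j, hji, h, hil, habs⟩

theorem isDiagonalAlt_iff (lst : List Int) : is_diagonal_alt lst = true ↔ Diag lst := by
  unfold is_diagonal_alt Diag
  have hgo := altGo_iff lst lst 0 PySem.Set.empty PySem.Set.empty (by simp)
    (by intro x; constructor
        · intro h; cases h
        · rintro ⟨j, hj, _⟩; omega)
    (by intro x; constructor
        · intro h; cases h
        · rintro ⟨j, hj, _⟩; omega)
  rw [Nat.cast_zero] at hgo
  rw [hgo]
  constructor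
  · rintro ⟨i, j, hji, _, hil, habs⟩; exact ⟨i, j, hji, hil, habs⟩
  · rintro ⟨i, j, hji, hil, habs⟩; exact ⟨i, j, hji, by omega, hil, habs⟩

-- ===== VERDICT (by name: the statement is the Claim_ definition above) =====
theorem is_diagonal_spec : Claim_equal_is_diagonal := by
  intro lst _
  unfold Spec_is_diagonal
  rw [Bool.eq_iff_iff, isDiagonal_iff, isDiagonalAlt_iff]
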